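-- pv_equiv track=rewrite | github.com/SJ-1011/BOJ | 백준/Silver/2164. 카드2/카드2.py | Solution
-- ===== SOURCE A (Python) =====
-- from collections import deque
--
-- def Solution(N):
--   queue = deque()
--
--   for i in range(1, N+1):
--     queue.append(i)
--
--   while len(queue) > 1:
--     queue.popleft()
--
--     if len(queue) <= 1:
--       break
--     else:
--       queue.append(queue.popleft())
--
--   return queue[0]
-- ===== SOURCE B (Python) =====
-- def Solution(N):
--     # Closed-form Josephus (k=2): survivor is N when N is the largest power of
--     # two <= N, else 2*(N - L) where L = largest power of two <= N.
--     L = 1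
--     while L * 2 <= N:
--         L *= 2
--     return N if N == L else 2 * (N - L)
-- ===== Notes on version B (the rewrite author's own statement) =====
-- stated objective: faster
-- what changed: Replaced the O(N) deque simulation with the closed-form Josephus(k=2) answer 2*(N-L) (or N itself when N=L), where L is the largest power of two <= N, found in O(log N).
-- outside the precondition, e.g. on Solution(0): A raises IndexError, B returns -2
import Mathlib
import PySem

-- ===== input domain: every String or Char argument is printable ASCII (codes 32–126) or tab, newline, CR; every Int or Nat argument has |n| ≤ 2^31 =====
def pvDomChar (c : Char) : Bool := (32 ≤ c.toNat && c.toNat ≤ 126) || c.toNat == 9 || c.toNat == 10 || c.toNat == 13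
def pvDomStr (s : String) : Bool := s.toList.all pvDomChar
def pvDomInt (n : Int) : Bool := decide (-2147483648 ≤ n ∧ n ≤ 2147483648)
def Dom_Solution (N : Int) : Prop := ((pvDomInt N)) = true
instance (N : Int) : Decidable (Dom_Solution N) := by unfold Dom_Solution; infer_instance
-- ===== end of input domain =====

-- B replaces A's deque simulation of the discard-alternate game by the closed-form
-- Josephus(k=2) answer computed from the largest power of two ≤ N.

-- ===== PORT A =====
-- collections.deque modelled as (front, back) lists with O(1) ends; the held
-- elements read left-to-right are front ++ back.reverse, and the size is carried
def pvPopLeft (f b : List Int) : Int × List Int × List Int :=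
  match f with
  | x :: f' => (x, f', b)
  | [] =>
    match b.reverse with
    | x :: f' => (x, f', [])
    | [] => (0, [], [])              -- unreachable: the loop guard keeps the deque nonempty

-- the while-loop: popleft; if len(queue) ≤ 1 break; else queue.append(queue.popleft())
def pvLoopA (f b : List Int) (size : Nat) : List Int :=
  if size > 1 then
    let (_, f1, b1) := pvPopLeft f b           -- queue.popleft()
    if size - 1 ≤ 1 then f1 ++ b1.reverse      -- break
    else
      let (x, f2, b2) := pvPopLeft f1 b1
      pvLoopA f2 (x :: b2) (size - 1)          -- queue.append(queue.popleft())
  else f ++ b.reverse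
termination_by size

def Solution (N : Int) : Int :=
  -- for i in range(1, N+1): queue.append(i)
  let st := (PySem.List.pyRange 1 (N + 1) 1).foldl
      (fun (st : List Int × List Int × Nat) i => (st.1, i :: st.2.1, st.2.2 + 1)) ([], [], 0)
  let queue := pvLoopA st.1 st.2.1 st.2.2
  -- queue[0] (IndexError on an empty deque → none; those inputs are excluded by Pre_)
  (PySem.List.pyGet? queue 0).getD 0

-- ===== PORT B =====
-- while L * 2 <= N: L *= 2   (the '1 ≤ L' conjunct only carries the loop invariant for termination)
def pvGrowL (N L : Int) : Int :=
  if h : L * 2 ≤ N ∧ 1 ≤ L then pvGrowL N (L * 2) else L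
termination_by (N - L).toNat
decreasing_by omega

def Solution_alt (N : Int) : Int :=
  let L := pvGrowL N 1
  if N = L then N else 2 * (N - L)

-- ===== PRECONDITION & SPEC =====
-- A raises IndexError (queue[0] of an empty deque) for every N ≤ 0.
def Pre_Solution (N : Int) : Prop := 1 ≤ N
instance (N : Int) : Decidable (Pre_Solution N) := by unfold Pre_Solution; infer_instance
def pvWitness_Solution : Int := (6)

def Spec_Solution (N : Int) (out : Int) : Prop := out = Solution_alt N
instance (N : Int) (out : Int) : Decidable (Spec_Solution N out) := by unfold Spec_Solution; infer_instance

-- ===== CLAIM (what is proved, stated in full; the proofs are below) =====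
def Claim_equal_Solution : Prop := ∀ (N : Int), Dom_Solution N → Pre_Solution N → Spec_Solution N (Solution N)

-- ===== LEMMAS AND PROOFS =====

-- abstract (one-list) version of A's loop; pvLoopA is proved equal to it below
def pvSimA (q : List Int) : List Int :=
  match q with
  | [] => []
  | [x] => [x]
  | _ :: b :: rest =>
    if rest = [] then [b]
    else pvSimA (rest ++ [b])
termination_by q.length
decreasing_by simp [List.length_append]

-- popping the front of the two-list deque pops the head of the abstract list
theorem pvPopLeft_spec (f b : List Int) (x : Int) (q : List Int)
    (h : f ++ b.reverse = x :: q) :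
    ∃ f' b', pvPopLeft f b = (x, f', b') ∧ f' ++ b'.reverse = q := by
  match f with
  | y :: f' =>
    simp only [List.cons_append] at h
    injection h with h1 h2
    exact ⟨f', b, by simp [pvPopLeft, h1], by simpa using h2⟩
  | [] =>
    simp only [List.nil_append] at h
    exact ⟨q, [], by simp [pvPopLeft, h], by simp⟩

-- the two-list loop computes the abstract loop
theorem pvLoopA_eq (n : Nat) : ∀ f b : List Int, (f ++ b.reverse).length = n →
    pvLoopA f b n = pvSimA (f ++ b.reverse) := by
  induction n using Nat.strong_induction_on with
  | _ n ih =>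
    intro f b hlen
    match hq : f ++ b.reverse with
    | [] =>
      have : n = 0 := by rw [hq] at hlen; simpa using hlen.symm
      subst this
      rw [pvLoopA]
      simp [pvSimA, hq]
    | [x] =>
      have : n = 1 := by rw [hq] at hlen; simpa using hlen.symm
      subst this
      rw [pvLoopA]
      simp [pvSimA, hq]
    | x :: y :: rest =>
      have hn : n = rest.length + 2 := by rw [hq] at hlen; simp at hlen; omega
      obtain ⟨f1, b1, hp1, ha1⟩ := pvPopLeft_spec f b x (y :: rest) hq
      rw [pvLoopA, if_pos (by omega), hp1]
      dsimp only
      by_cases hr : rest = []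
      · subst hr
        rw [if_pos (by simp only [List.length_nil] at hn; omega)]
        simp [pvSimA, ha1]
      · rw [if_neg (by
          have : rest.length ≠ 0 := fun hc => hr (List.length_eq_zero_iff.mp hc)
          omega)]
        obtain ⟨f2, b2, hp2, ha2⟩ := pvPopLeft_spec f1 b1 y rest ha1
        rw [hp2]
        dsimp only
        have habs : f2 ++ (y :: b2).reverse = rest ++ [y] := by
          simp only [List.reverse_cons]
          rw [← List.append_assoc, ha2]
        have hlen2 : (f2 ++ (y :: b2).reverse).length = n - 1 := by
          rw [habs]; simp; omega
        rw [ih (n - 1) (by omega) f2 (y :: b2) hlen2, habs]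
        simp [pvSimA, hr]

-- building the deque: each append conses onto the back and bumps the size
theorem pvBuild (l : List Int) : ∀ (f b : List Int) (s : Nat),
    l.foldl (fun (st : List Int × List Int × Nat) i => (st.1, i :: st.2.1, st.2.2 + 1)) (f, b, s)
      = (f, l.reverse ++ b, s + l.length) := by
  induction l with
  | nil => intro f b s; simp
  | cons x xs ih =>
    intro f b s
    simp only [List.foldl_cons, ih, List.reverse_cons, List.length_cons]
    refine congrArg _ (congrArg₂ _ (by simp) (by omega))

-- pvSimA only moves/drops queue entries, so it commutes with a relabelling map
theorem pvSimA_map (f : Int → Int) (q : List Int) :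
    pvSimA (q.map f) = (pvSimA q).map f := by
  fun_induction pvSimA q with
  | case1 => simp [pvSimA]
  | case2 x => simp [pvSimA]
  | case3 a b => simp [pvSimA]
  | case4 a b rest h ih =>
    have h' : rest.map f ≠ [] := by simpa using h
    calc pvSimA ((a :: b :: rest).map f) = pvSimA ((rest ++ [b]).map f) := by
          simp [pvSimA, h']
      _ = _ := by rw [ih]

-- the queue 1..n
def pvQ (n : Nat) : List Int := PySem.List.pyRange 1 ((n : Int) + 1) 1

-- survivor-value recurrence: after one round-trip step the queue 1..(n+2)
-- becomes 3..(n+2),2, i.e. a relabelling of 1..(n+1)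
def pvW : Nat → Int
  | 0 => 0
  | 1 => 1
  | n + 2 => if pvW (n + 1) ≤ (n : Int) then pvW (n + 1) + 2 else 2

theorem pvQ_eq (n : Nat) : pvQ n = (List.range n).map (fun k : Nat => (k : Int) + 1) := by
  rw [pvQ, PySem.List.pyRange_one]
  have h1 : ((n : Int) + 1 - 1).toNat = n := by omega
  rw [h1]
  apply List.map_congr_left
  intro k _
  omega

theorem pvQ_succ (n : Nat) : pvQ (n + 1) = pvQ n ++ [(n : Int) + 1] := by
  simp [pvQ_eq, List.range_succ]

theorem pvQ_two (m : Nat) : pvQ (m + 2) = 1 :: 2 :: (pvQ m).map (fun i => i + 2) := by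
  simp only [pvQ_eq, List.range_succ_eq_map, List.map_cons, List.map_map]
  refine List.cons_eq_cons.mpr ⟨by norm_num, List.cons_eq_cons.mpr ⟨by norm_num, ?_⟩⟩
  apply List.map_congr_left
  intro k _
  simp only [Function.comp_apply]
  push_cast
  ring

theorem pvQ_len (m : Nat) : (pvQ m).length = m := by
  simp [pvQ_eq]

-- the simulation of A's while-loop on the queue 1..n ends with the single card pvW n
theorem pvSimA_pvQ (n : Nat) (hn : 1 ≤ n) : pvSimA (pvQ n) = [pvW n] := by
  induction n with
  | zero => omega
  | succ n ih =>
    rcases Nat.lt_or_ge n 2 with h2 | h2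
    · interval_cases n
      · simp [pvQ_eq, pvSimA, pvW]
      · simp [pvQ_eq, pvSimA, pvW, List.range_succ]
    · set σ : Int → Int := fun i => if i ≤ (n : Int) - 1 then i + 2 else 2 with hσ
      obtain ⟨m, rfl⟩ : ∃ m, n = m + 1 := ⟨n - 1, by omega⟩
      have hmap : (pvQ (m + 1)).map σ = (pvQ m).map (fun i => i + 2) ++ [2] := by
        rw [pvQ_succ, List.map_append]
        congr 1
        · apply List.map_congr_left
          intro x hx
          rw [pvQ] at hx
          have hb := (PySem.List.mem_pyRange_one.mp hx)
          simp only [hσ]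
          have : x ≤ (↑(m + 1) : Int) - 1 := by push_cast; omega
          rw [if_pos this]
        · simp only [List.map_cons, List.map_nil, hσ]
          have : ¬ ((m : Int) + 1 ≤ (↑(m + 1) : Int) - 1) := by push_cast; omega
          rw [if_neg this]
      have htail : (pvQ m).map (fun i => i + 2) ≠ [] := by
        have hl : (pvQ m).length = m := pvQ_len m
        intro hc
        rw [← List.length_eq_zero_iff] at hc
        simp [hl] at hc
        omega
      have h1 : pvSimA (pvQ (m + 1 + 1)) = pvSimA ((pvQ (m + 1)).map σ) := by
        rw [show m + 1 + 1 = m + 2 from rfl, pvQ_two, hmap]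
        simp [pvSimA, htail]
      rw [h1, pvSimA_map, ih (by omega)]
      have hy : σ (pvW (m + 1)) = pvW (m + 1 + 1) := by
        simp only [hσ, pvW]
        push_cast
        norm_num
      simp [hy]

-- closed form for the survivor value, in terms of the largest power of two ≤ n
theorem pvW_closed (n : Nat) (k : Nat) (h1 : 2 ^ k ≤ n) (h2 : n < 2 ^ (k + 1)) :
    pvW n = if (n : Int) = ((2 ^ k : Nat) : Int) then (n : Int)
            else 2 * ((n : Int) - ((2 ^ k : Nat) : Int)) := by
  induction n generalizing k with
  | zero =>
    exfalso
    have := Nat.one_le_two_pow (n := k)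
    omega
  | succ n ih =>
    have hp1 : 1 ≤ 2 ^ k := Nat.one_le_two_pow
    have hps : 2 ^ (k + 1) = 2 * 2 ^ k := by ring
    rcases Nat.eq_zero_or_pos n with rfl | hn
    · have hk : k = 0 := by
        by_contra hk0
        have : 2 ≤ 2 ^ k := Nat.one_lt_two_pow_iff.mpr hk0
        omega
      subst hk
      simp [pvW]
    · obtain ⟨m, rfl⟩ : ∃ m, n = m + 1 := ⟨n - 1, by omega⟩
      rcases eq_or_lt_of_le h1 with heq | hlt
      · -- n + 2 = 2^k : use the IH at k - 1
        have hkne : k ≠ 0 := by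
          intro h
          rw [h] at heq
          norm_num at heq
        obtain ⟨j, rfl⟩ : ∃ j, k = j + 1 := ⟨k - 1, by omega⟩
        have hj1 : 1 ≤ 2 ^ j := Nat.one_le_two_pow
        have hjs : 2 ^ (j + 1) = 2 * 2 ^ j := by ring
        have hW := ih j (by omega) (by omega)
        by_cases hc : m + 1 = 2 ^ j
        · -- forces 2^j = 1, m = 0
          have hj0 : 2 ^ j = 1 := by omega
          have hm0 : m = 0 := by omega
          subst hm0
          have hv : pvW 1 = 1 := rfl
          rw [pvW, hv]
          rw [if_neg (by norm_num), if_pos (by omega)]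
          omega
        · have hcI : ((m + 1 : Nat) : Int) ≠ ((2 ^ j : Nat) : Int) := by exact_mod_cast hc
          have hv : pvW (m + 1) = 2 * ((m : Int) + 1 - ((2 ^ j : Nat) : Int)) := by
            rw [hW, if_neg hcI]
            simp only [Nat.cast_add, Nat.cast_one]
          have hval : (2 : Int) * ((m : Int) + 1 - ((2 ^ j : Nat) : Int)) = (m : Int) := by omega
          rw [pvW, hv, hval, if_pos (le_refl _),
              if_pos (by simp only [Nat.cast_add, Nat.cast_one]; omega)]
          simp only [Nat.cast_add, Nat.cast_one]
          omega
      · -- 2^k ≤ m + 1 : use the IH at k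
        have hW := ih k (by omega) (by omega)
        by_cases hc : m + 1 = 2 ^ k
        · have hcI : ((m + 1 : Nat) : Int) = ((2 ^ k : Nat) : Int) := by exact_mod_cast hc
          have hv : pvW (m + 1) = (m : Int) + 1 := by
            rw [hW, if_pos hcI]
            simp only [Nat.cast_add, Nat.cast_one]
          rw [pvW, hv, if_neg (by simp only [Nat.cast_add, Nat.cast_one] at hcI; omega),
              if_neg (by simp only [Nat.cast_add, Nat.cast_one] at hcI;
                         simp only [Nat.cast_add, Nat.cast_one]; omega)]
          simp only [Nat.cast_add, Nat.cast_one] at hcI ⊢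
          omega
        · have hcI : ((m + 1 : Nat) : Int) ≠ ((2 ^ k : Nat) : Int) := by exact_mod_cast hc
          have hv : pvW (m + 1) = 2 * ((m : Int) + 1 - ((2 ^ k : Nat) : Int)) := by
            rw [hW, if_neg hcI]
            simp only [Nat.cast_add, Nat.cast_one]
          rw [pvW, hv, if_pos (by omega),
              if_neg (by simp only [Nat.cast_add, Nat.cast_one]; omega)]
          simp only [Nat.cast_add, Nat.cast_one]
          omega

-- B's loop starting from 2^j reaches the largest power of two ≤ N
theorem pvGrowL_spec (n : Nat) : ∀ (N : Int) (j : Nat), (N - 2 ^ j).toNat ≤ n →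
    (2 : Int) ^ j ≤ N →
    ∃ k : Nat, pvGrowL N ((2 : Int) ^ j) = 2 ^ k ∧ (2 : Int) ^ k ≤ N ∧ N < 2 ^ (k + 1) := by
  induction n with
  | zero =>
    intro N j hm hj
    have hj1 : (1 : Int) ≤ 2 ^ j := one_le_pow₀ (by norm_num)
    have hEq : N = 2 ^ j := by omega
    rw [pvGrowL, dif_neg (by omega)]
    refine ⟨j, rfl, hj, ?_⟩
    have : (2 : Int) ^ (j + 1) = 2 * 2 ^ j := by ring
    omega
  | succ n ih =>
    intro N j hm hj
    have hj1 : (1 : Int) ≤ 2 ^ j := one_le_pow₀ (by norm_num)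
    have hs : (2 : Int) ^ (j + 1) = 2 ^ j * 2 := by ring
    by_cases hc : (2 : Int) ^ j * 2 ≤ N
    · rw [pvGrowL, dif_pos ⟨hc, hj1⟩, show (2 : Int) ^ j * 2 = 2 ^ (j + 1) from hs.symm]
      exact ih N (j + 1) (by omega) (by omega)
    · rw [pvGrowL, dif_neg (by omega)]
      exact ⟨j, rfl, hj, by omega⟩

-- ===== VERDICT (by name: the statement is the Claim_ definition above) =====
theorem Solution_spec : Claim_equal_Solution := by
  intro N _ hpre
  unfold Spec_Solution Pre_Solution at *
  obtain ⟨n, rfl⟩ : ∃ n : Nat, N = (n : Int) := ⟨N.toNat, by omega⟩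
  have hn : 1 ≤ n := by exact_mod_cast hpre
  -- value of A's port
  have hA : Solution (n : Int) = pvW n := by
    unfold Solution
    show (PySem.List.pyGet? (pvLoopA
        (((PySem.List.pyRange 1 ((n : Int) + 1) 1).foldl
          (fun (st : List Int × List Int × Nat) i => (st.1, i :: st.2.1, st.2.2 + 1)) ([], [], 0)).1)
        (((PySem.List.pyRange 1 ((n : Int) + 1) 1).foldl
          (fun (st : List Int × List Int × Nat) i => (st.1, i :: st.2.1, st.2.2 + 1)) ([], [], 0)).2.1)
        (((PySem.List.pyRange 1 ((n : Int) + 1) 1).foldl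
          (fun (st : List Int × List Int × Nat) i => (st.1, i :: st.2.1, st.2.2 + 1)) ([], [], 0)).2.2))
      0).getD 0 = pvW n
    rw [pvBuild, show PySem.List.pyRange 1 ((n : Int) + 1) 1 = pvQ n from rfl]
    have hst : (([] : List Int), (pvQ n).reverse ++ ([] : List Int), 0 + (pvQ n).length)
        = (([] : List Int), (pvQ n).reverse, n) := by
      simp [pvQ_len]
    rw [hst]
    have hlen : (([] : List Int) ++ ((pvQ n).reverse).reverse).length = n := by
      simp [pvQ_len]
    rw [pvLoopA_eq n [] (pvQ n).reverse hlen]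
    simp only [List.nil_append, List.reverse_reverse]
    rw [pvSimA_pvQ n hn]
    simp [PySem.List.pyGet?, PySem.List.pyIdx?]
  -- value of B's port
  obtain ⟨k, hrun, hk1, hk2⟩ :=
    pvGrowL_spec ((n : Int) - 2 ^ 0).toNat (n : Int) 0 (le_refl _)
      (by norm_num; exact_mod_cast hn)
  have hcast : ((2 ^ k : Nat) : Int) = (2 : Int) ^ k := by push_cast; ring
  have hB : Solution_alt (n : Int) =
      if (n : Int) = ((2 ^ k : Nat) : Int) then (n : Int)
      else 2 * ((n : Int) - ((2 ^ k : Nat) : Int)) := by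
    unfold Solution_alt
    rw [show (1 : Int) = 2 ^ 0 by norm_num, hrun, hcast]
  rw [hA, hB]
  exact pvW_closed n k (by exact_mod_cast hcast ▸ hk1) (by
    have : (2 : Int) ^ (k + 1) = ((2 ^ (k + 1) : Nat) : Int) := by push_cast; ring
    rw [this] at hk2
    exact_mod_cast hk2)
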